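-- pv_equiv track=rewrite | github.com/amol179/DSA_Notes_Dump | USACO/Code_Force/1000/The Best friend of a Man/best friend.py | minimum_additional_walks
-- ===== SOURCE A (Python) =====
-- def minimum_additional_walks(n, k, a):
--     b = a.copy()
--     additional_walks = 0
--
--     for i in range(1, n):
--         if b[i - 1] + b[i] < k:
--             additional_walks_needed = k - (b[i - 1] + b[i])
--             b[i] += additional_walks_needed
--             additional_walks += additional_walks_needed
--
--     return additional_walks, b
-- ===== SOURCE B (Python) =====
-- def minimum_additional_walks(n, k, a):
--     # Unfolding the adjacency constraint gives b[i] = max(a[i], min(k - a[i-1], b[i-2])):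
--     # each adjusted value depends only on the ORIGINAL neighbour and the adjusted value
--     # two steps back, so the even and odd positions form two independent chains that
--     # can be computed by two separate scans.
--     b = a.copy()
--     if n >= 2:
--         prev = max(a[1], k - a[0])
--         b[1] = prev
--         for i in range(3, n, 2):            # odd-index chain
--             prev = max(a[i], min(k - a[i - 1], prev))
--             b[i] = prev
--         prev = a[0]
--         for i in range(2, n, 2):            # even-index chain
--             prev = max(a[i], min(k - a[i - 1], prev))
--             b[i] = prev
--     return sum(b) - sum(a), b
-- ===== Notes on version B (the rewrite author's own statement) =====
-- stated objective: alternative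
-- what changed: B replaces A's sequential greedy (raise b[i] so b[i-1]+b[i] reaches k, accumulating the total) by the algebraically unfolded recurrence b[i] = max(a[i], min(k - a[i-1], b[i-2])), which decouples the positions into two independent parity chains computed by two separate scans, with the total taken afterwards as sum(b) - sum(a); Pre_ excludes only the inputs (n >= 2 and n > len(a)) on which A raises IndexError.
import Mathlib
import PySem

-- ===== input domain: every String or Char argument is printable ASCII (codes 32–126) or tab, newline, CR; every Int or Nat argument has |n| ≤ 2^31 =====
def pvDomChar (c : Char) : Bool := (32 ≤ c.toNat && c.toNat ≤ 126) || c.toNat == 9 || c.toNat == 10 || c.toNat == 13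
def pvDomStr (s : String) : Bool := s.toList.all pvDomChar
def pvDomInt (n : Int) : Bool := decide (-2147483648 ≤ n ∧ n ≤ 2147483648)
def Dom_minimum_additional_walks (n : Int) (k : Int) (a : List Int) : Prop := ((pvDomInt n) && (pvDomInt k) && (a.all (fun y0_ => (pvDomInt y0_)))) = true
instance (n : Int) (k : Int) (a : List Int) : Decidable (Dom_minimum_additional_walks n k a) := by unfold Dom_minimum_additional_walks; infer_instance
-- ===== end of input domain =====

-- B unfolds the adjacency constraint into b[i] = max(a[i], min(k - a[i-1], b[i-2])), which splits
-- the positions into two independent parity chains computed by two separate scans ('alternative').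

-- ===== PORT A =====
-- loop body of A (b[i-1]+b[i] test, in-place update of b and the running total)
def stepA (k : Int) (st : List Int × Int) (i : Int) : List Int × Int :=
  let prev := PySem.List.pyGetD st.1 (i - 1) 0
  let cur := PySem.List.pyGetD st.1 i 0
  if prev + cur < k then
    (PySem.List.pySetD st.1 i (cur + (k - (prev + cur))), st.2 + (k - (prev + cur)))
  else st

def minimum_additional_walks (n : Int) (k : Int) (a : List Int) : Int × List Int :=
  let st := (PySem.List.pyRange 1 n 1).foldl (stepA k) (a, 0)
  (st.2, st.1)

-- ===== PORT B =====
-- loop body shared by B's two parity scans: v = max(a[i], min(k - a[i-1], prev)); b[i] = v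
def stepB (k : Int) (a : List Int) (st : List Int × Int) (i : Int) : List Int × Int :=
  let v := max (PySem.List.pyGetD a i 0) (min (k - PySem.List.pyGetD a (i - 1) 0) st.2)
  (PySem.List.pySetD st.1 i v, v)

-- B's adjusted list: seed b[1], then the odd-index chain (3,5,…) and the even-index chain (2,4,…)
def altList (n : Int) (k : Int) (a : List Int) : List Int :=
  if 2 ≤ n then
    ((PySem.List.pyRange 2 n 2).foldl (stepB k a)
      (((PySem.List.pyRange 3 n 2).foldl (stepB k a)
          (PySem.List.pySetD a 1 (max (PySem.List.pyGetD a 1 0) (k - PySem.List.pyGetD a 0 0)),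
           max (PySem.List.pyGetD a 1 0) (k - PySem.List.pyGetD a 0 0))).1,
       PySem.List.pyGetD a 0 0)).1
  else a

def minimum_additional_walks_alt (n : Int) (k : Int) (a : List Int) : Int × List Int :=
  let b := altList n k a
  (b.sum - a.sum, b)

-- ===== PRECONDITION & SPEC =====
-- Pre_ excludes exactly the inputs where A raises IndexError: n ≥ 2 with n > len(a).
def Pre_minimum_additional_walks (n : Int) (k : Int) (a : List Int) : Prop :=
  n ≤ 1 ∨ n ≤ (a.length : Int)
instance (n : Int) (k : Int) (a : List Int) : Decidable (Pre_minimum_additional_walks n k a) := by unfold Pre_minimum_additional_walks; infer_instance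

def pvWitness_minimum_additional_walks : Int × Int × List Int := (3, 10, [2, 3, 4])

def Spec_minimum_additional_walks (n : Int) (k : Int) (a : List Int) (out : Int × List Int) : Prop := out = minimum_additional_walks_alt n k a
instance (n : Int) (k : Int) (a : List Int) (out : Int × List Int) : Decidable (Spec_minimum_additional_walks n k a out) := by unfold Spec_minimum_additional_walks; infer_instance

-- ===== CLAIM (what is proved, stated in full; the proofs are below) =====
def Claim_equal_minimum_additional_walks : Prop := ∀ (n : Int) (k : Int) (a : List Int), Dom_minimum_additional_walks n k a → Pre_minimum_additional_walks n k a → Spec_minimum_additional_walks n k a (minimum_additional_walks n k a)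

-- ===== LEMMAS AND PROOFS =====

-- The sequential characterisation: gseq j is the final value at position j.
def gseq (k n : Int) (a : List Int) : Nat → Int
  | 0 => a.getD 0 0
  | j + 1 => if (j : Int) + 1 < n then max (a.getD (j + 1) 0) (k - gseq k n a j) else a.getD (j + 1) 0

theorem gseq_succ (k n : Int) (a : List Int) (j : Nat) (h : (j : Int) + 1 < n) :
    gseq k n a (j + 1) = max (a.getD (j + 1) 0) (k - gseq k n a j) := by
  show (if (j : Int) + 1 < n then max (a.getD (j + 1) 0) (k - gseq k n a j) else a.getD (j + 1) 0) = _
  rw [if_pos h]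

theorem gseq_succ_ge (k n : Int) (a : List Int) (j : Nat) (h : ¬ ((j : Int) + 1 < n)) :
    gseq k n a (j + 1) = a.getD (j + 1) 0 := by
  show (if (j : Int) + 1 < n then max (a.getD (j + 1) 0) (k - gseq k n a j) else a.getD (j + 1) 0) = _
  rw [if_neg h]

-- stride-2 unfolding: position j+2 depends only on the original a[j+1] and the value two back
theorem gseq_stride (k n : Int) (a : List Int) (t : Nat) (h : (t : Int) + 2 < n) :
    gseq k n a (t + 2) = max (a.getD (t + 2) 0) (min (k - a.getD (t + 1) 0) (gseq k n a t)) := by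
  rw [show t + 2 = (t + 1) + 1 from rfl,
      gseq_succ k n a (t + 1) (by push_cast; omega),
      gseq_succ k n a t (by omega)]
  omega

-- step-2 ranges: cons and nil forms
theorem pyRange_two_cons (a b : Int) (h : a < b) :
    PySem.List.pyRange a b 2 = a :: PySem.List.pyRange (a + 2) b 2 := by
  rw [PySem.List.pyRange_of_pos a b (by norm_num), PySem.List.pyRange_of_pos (a + 2) b (by norm_num),
      if_pos h]
  by_cases h2 : a + 2 < b
  · rw [if_pos h2]
    have hcnt : ((b - a + 2 - 1) / 2).toNat = ((b - (a + 2) + 2 - 1) / 2).toNat + 1 := by omega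
    rw [hcnt, List.range_succ_eq_map, List.map_cons, List.map_map]
    norm_num
    intro x _
    push_cast
    ring
  · rw [if_neg h2]
    have hcnt : ((b - a + 2 - 1) / 2).toNat = 1 := by omega
    rw [hcnt]
    norm_num

theorem pyRange_two_nil (a b : Int) (h : b ≤ a) : PySem.List.pyRange a b 2 = [] := by
  rw [PySem.List.pyRange_of_pos a b (by norm_num), if_neg (by omega)]
  simp

-- getD after set
theorem getD_set' (l : List Int) (m j : Nat) (v : Int) (hm : m < l.length) :
    (l.set m v).getD j 0 = if j = m then v else l.getD j 0 := by
  simp only [List.getD_eq_getElem?_getD, List.getElem?_set]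
  rcases eq_or_ne j m with rfl | hne
  · simp [hm]
  · simp [hne, Ne.symm hne]

-- lists agreeing pointwise in getD and in length are equal
theorem ext_getD (l1 l2 : List Int) (hlen : l1.length = l2.length)
    (h : ∀ j : Nat, l1.getD j 0 = l2.getD j 0) : l1 = l2 := by
  apply List.ext_getElem hlen
  intro i h1 h2
  have hi := h i
  rw [List.getD_eq_getElem?_getD, List.getD_eq_getElem?_getD,
      List.getElem?_eq_getElem h1, List.getElem?_eq_getElem h2] at hi
  simpa using hi

-- ===== A-side: chain transform and loop characterisation =====
def chainC (k : Int) (prev : Int) : List Int → List Int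
  | [] => []
  | x :: xs => max x (k - prev) :: chainC k (max x (k - prev)) xs

def lastC (k : Int) (prev : Int) : List Int → Int
  | [] => prev
  | x :: xs => lastC k (max x (k - prev)) xs

theorem length_chainC (k prev : Int) (xs : List Int) : (chainC k prev xs).length = xs.length := by
  induction xs generalizing prev with
  | nil => rfl
  | cons x xs ih => simp [chainC, ih]

theorem getLastD_chainC (k prev : Int) (xs : List Int) :
    (chainC k prev xs).getLastD prev = lastC k prev xs := by
  induction xs generalizing prev with
  | nil => rfl
  | cons x xs ih =>
    simp only [chainC, lastC]
    rw [List.getLastD_cons]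
    exact ih _

theorem chainC_append_singleton (k prev y : Int) (l : List Int) :
    chainC k prev (l ++ [y]) = chainC k prev l ++ [max y (k - lastC k prev l)] := by
  induction l generalizing prev with
  | nil => rfl
  | cons x l ih => simp [chainC, lastC, ih]

theorem getD_mid (x : Int) (l1 l2 : List Int) (m : Nat) (h : l1.length = m) :
    (x :: l1 ++ l2).getD m 0 = l1.getLastD x := by
  induction l1 generalizing x m with
  | nil => subst h; simp
  | cons y l1 ih =>
    subst h
    rw [List.length_cons, List.cons_append, List.getD_cons_succ, List.getLastD_cons]
    exact ih y l1.length rfl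

theorem getD_mid2 (x v : Int) (l1 l2 : List Int) (m : Nat) (h : l1.length = m) :
    (x :: l1 ++ v :: l2).getD (m + 1) 0 = v := by
  induction l1 generalizing x m with
  | nil => subst h; simp
  | cons y l1 ih =>
    subst h
    simpa using ih y l1.length rfl

theorem set_mid (x v w : Int) (l1 l2 : List Int) (m : Nat) (h : l1.length = m) :
    (x :: l1 ++ v :: l2).set (m + 1) w = x :: l1 ++ w :: l2 := by
  induction l1 generalizing x m with
  | nil => subst h; simp
  | cons y l1 ih =>
    subst h
    simpa using ih y l1.length rfl

-- A's loop after m iterations, in take/drop normal form.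
theorem A_loop (k x : Int) (m : Nat) : ∀ (xs : List Int), m ≤ xs.length →
    (PySem.List.pyRange 1 (1 + (m : Int)) 1).foldl (stepA k) (x :: xs, 0)
    = (x :: chainC k x (xs.take m) ++ xs.drop m,
       (chainC k x (xs.take m)).sum - (xs.take m).sum) := by
  induction m with
  | zero =>
    intro xs h
    rw [PySem.List.pyRange_one_eq_nil (by omega)]
    simp [chainC]
  | succ m ih =>
    intro xs h
    have hb : (1 : Int) + ((m : Int) + 1) = (1 + (m : Int)) + 1 := by omega
    rw [show ((m + 1 : Nat) : Int) = (m : Int) + 1 by push_cast; ring, hb,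
        PySem.List.pyRange_one_succ_right (by omega), List.foldl_append,
        ih xs (by omega)]
    have hm : m < xs.length := by omega
    have hlen : (chainC k x (xs.take m)).length = m := by
      rw [length_chainC, List.length_take]; omega
    rw [List.drop_eq_getElem_cons hm]
    simp only [List.foldl_cons, List.foldl_nil, stepA]
    have e1 : (1 + (m : Int)) - 1 = ((m : Nat) : Int) := by omega
    have e2 : (1 + (m : Int)) = (((m + 1) : Nat) : Int) := by push_cast; ring
    rw [e1, e2, PySem.List.pyGetD_natCast, PySem.List.pyGetD_natCast, PySem.List.pySetD_natCast,
        getD_mid x _ _ m hlen, getD_mid2 x _ _ _ m hlen, set_mid x _ _ _ _ m hlen,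
        getLastD_chainC]
    have htake : xs.take (m + 1) = xs.take m ++ [xs[m]] := by
      rw [List.take_add_one, List.getElem?_eq_getElem hm]; rfl
    rw [htake, chainC_append_singleton]
    set P := lastC k x (xs.take m) with hP
    have hts : (List.take (m + 1) xs).sum = (List.take m xs).sum + xs[m] := by
      rw [htake, List.sum_append, List.sum_cons, List.sum_nil]; ring
    split_ifs with hc
    · have hmax : max xs[m] (k - P) = xs[m] + (k - (P + xs[m])) := by omega
      rw [hmax]
      refine Prod.ext ?_ ?_
      · simp [List.sum_append]
      · dsimp only
        simp [List.sum_append]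
        omega
    · have hmax : max xs[m] (k - P) = xs[m] := by omega
      rw [hmax]
      refine Prod.ext ?_ ?_
      · simp
      · dsimp only
        simp [List.sum_append]
        omega

-- chainC prefix values are gseq values (shifted by the leading x)
theorem chainC_getD_zero (k prev x : Int) (l : List Int) :
    (chainC k prev (x :: l)).getD 0 0 = max x (k - prev) := rfl

theorem chainC_getD_succ (k : Int) (l : List Int) :
    ∀ (prev : Int) (j : Nat), j + 1 < l.length →
    (chainC k prev l).getD (j + 1) 0 = max (l.getD (j + 1) 0) (k - (chainC k prev l).getD j 0) := by
  induction l with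
  | nil => intro prev j h; simp at h
  | cons y l ih =>
    intro prev j h
    cases j with
    | zero =>
      cases l with
      | nil => simp at h
      | cons z l' => simp [chainC, chainC_getD_zero]
    | succ j' =>
      have h' : j' + 1 < l.length := by simp at h; omega
      simp only [chainC, List.getD_cons_succ]
      exact ih (max y (k - prev)) j' h'

theorem chainC_getD_gseq (k x : Int) (xs : List Int) (m : Nat) (hm1 : 1 ≤ m) (hm : m ≤ xs.length) :
    ∀ j : Nat, j < m →
    (chainC k x (xs.take m)).getD j 0 = gseq k (1 + (m : Int)) (x :: xs) (j + 1) := by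
  intro j
  induction j with
  | zero =>
    intro _
    cases xs with
    | nil => simp at hm; omega
    | cons y ys =>
      cases m with
      | zero => omega
      | succ m' =>
        rw [List.take_succ_cons, chainC_getD_zero,
            gseq_succ k _ _ 0 (by push_cast; omega)]
        simp [gseq]
  | succ j' ih =>
    intro hj
    have hlen : j' + 1 < (xs.take m).length := by
      rw [List.length_take]; omega
    have hget : (xs.take m).getD (j' + 1) 0 = (x :: xs).getD (j' + 1 + 1) 0 := by
      rw [List.getD_cons_succ, List.getD_eq_getElem?_getD, List.getD_eq_getElem?_getD,
          List.getElem?_take, if_pos (by omega)]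
    rw [chainC_getD_succ _ _ _ _ hlen, ih (by omega), hget,
        gseq_succ k _ _ (j' + 1) (by push_cast; omega)]

-- A's final list is gseq pointwise
theorem A_getD (k x : Int) (xs : List Int) (m : Nat) (hm1 : 1 ≤ m) (hm : m ≤ xs.length) :
    ∀ j : Nat, (x :: chainC k x (xs.take m) ++ xs.drop m).getD j 0
      = gseq k (1 + (m : Int)) (x :: xs) j := by
  intro j
  have hlenC : (chainC k x (xs.take m)).length = m := by
    rw [length_chainC, List.length_take]; omega
  have hL1 : (x :: chainC k x (xs.take m)).length = m + 1 := by simp [hlenC]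
  cases j with
  | zero =>
    rw [List.getD_eq_getElem?_getD, List.getElem?_append, if_pos (by simp)]
    rfl
  | succ j =>
    by_cases hj : j < m
    · rw [List.getD_eq_getElem?_getD, List.getElem?_append, hL1, if_pos (by omega),
          List.getElem?_cons_succ, ← List.getD_eq_getElem?_getD]
      exact chainC_getD_gseq k x xs m hm1 hm j hj
    · rw [List.getD_eq_getElem?_getD, List.getElem?_append, hL1, if_neg (by omega),
          List.getElem?_drop, show m + (j + 1 - (m + 1)) = j by omega,
          gseq_succ_ge k _ _ j (by push_cast; omega), List.getD_cons_succ,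
          List.getD_eq_getElem?_getD]

-- ===== B-side: the two parity scans compute gseq on their residue class =====
theorem B_loop (k n : Int) (a : List Int) (hn : n ≤ (a.length : Int)) :
    ∀ (c : Nat) (s : Int) (b : List Int), 2 ≤ s → (n - s).toNat ≤ c → b.length = a.length →
    (((PySem.List.pyRange s n 2).foldl (stepB k a) (b, gseq k n a (s - 2).toNat)).1.length = a.length) ∧
    (∀ j : Nat, ((PySem.List.pyRange s n 2).foldl (stepB k a) (b, gseq k n a (s - 2).toNat)).1.getD j 0 =
      if s ≤ (j : Int) ∧ (j : Int) < n ∧ ((j : Int) - s) % 2 = 0 then gseq k n a j else b.getD j 0) := by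
  intro c
  induction c with
  | zero =>
    intro s b hs hc hb
    rw [pyRange_two_nil _ _ (by omega)]
    simp only [List.foldl_nil]
    exact ⟨hb, fun j => by rw [if_neg (by omega)]⟩
  | succ c ih =>
    intro s b hs hc hb
    by_cases hlt : s < n
    · rw [pyRange_two_cons _ _ hlt, List.foldl_cons]
      have hveq : max (PySem.List.pyGetD a s 0) (min (k - PySem.List.pyGetD a (s - 1) 0) (gseq k n a (s - 2).toNat))
          = gseq k n a s.toNat := by
        rw [PySem.List.pyGetD_of_nonneg _ _ (by omega : (0:Int) ≤ s),
            PySem.List.pyGetD_of_nonneg _ _ (by omega : (0:Int) ≤ s - 1),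
            show s.toNat = (s - 2).toNat + 2 by omega,
            show (s - 1).toNat = (s - 2).toNat + 1 by omega,
            gseq_stride k n a (s - 2).toNat (by omega)]
      have hstep : stepB k a (b, gseq k n a (s - 2).toNat) s
          = (b.set s.toNat (gseq k n a s.toNat), gseq k n a ((s + 2) - 2).toNat) := by
        simp only [stepB, hveq]
        rw [PySem.List.pySetD_of_nonneg _ _ (by omega : (0:Int) ≤ s),
            show ((s + 2) - 2).toNat = s.toNat by omega]
      rw [hstep]
      obtain ⟨ihlen, ihget⟩ := ih (s + 2) (b.set s.toNat (gseq k n a s.toNat))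
        (by omega) (by omega) (by simp [hb])
      refine ⟨ihlen, fun j => ?_⟩
      rw [ihget j]
      have hslen : s.toNat < b.length := by rw [hb]; omega
      have hjs : (j = s.toNat) ↔ ((j : Int) = s) := by omega
      by_cases h1 : s + 2 ≤ (j : Int) ∧ (j : Int) < n ∧ ((j : Int) - (s + 2)) % 2 = 0
      · rw [if_pos h1, if_pos (by omega)]
      · rw [if_neg h1, getD_set' b s.toNat j _ hslen]
        by_cases h2 : j = s.toNat
        · subst h2
          rw [if_pos rfl, if_pos (by omega)]
        · rw [if_neg h2]
          rw [if_neg (by rw [hjs] at h2; omega)]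
    · rw [pyRange_two_nil _ _ (by omega)]
      simp only [List.foldl_nil]
      exact ⟨hb, fun j => by rw [if_neg (by omega)]⟩

-- B's final list is gseq pointwise
theorem altList_spec (n k : Int) (a : List Int) (h2 : 2 ≤ n) (hlen : n ≤ (a.length : Int)) :
    (altList n k a).length = a.length ∧ ∀ j : Nat, (altList n k a).getD j 0 = gseq k n a j := by
  have hyp1 : max (PySem.List.pyGetD a 1 0) (k - PySem.List.pyGetD a 0 0) = gseq k n a 1 := by
    rw [PySem.List.pyGetD_ofNat', PySem.List.pyGetD_ofNat',
        gseq_succ k n a 0 (by omega)]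
    rfl
  have hset : PySem.List.pySetD a 1 (gseq k n a 1) = a.set 1 (gseq k n a 1) := by
    rw [PySem.List.pySetD_of_nonneg _ _ (by norm_num : (0:Int) ≤ 1)]
    norm_num
  have h1len : (1 : Nat) < a.length := by omega
  have hb1len : (a.set 1 (gseq k n a 1)).length = a.length := by simp
  unfold altList
  rw [if_pos h2, hyp1, hset]
  obtain ⟨len3, get3⟩ := B_loop k n a hlen (n - 3).toNat 3 (a.set 1 (gseq k n a 1))
    (by norm_num) (by omega) hb1len
  rw [show gseq k n a ((3 : Int) - 2).toNat = gseq k n a 1 from by norm_num] at len3 get3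
  have hseed2 : PySem.List.pyGetD a 0 0 = gseq k n a ((2 : Int) - 2).toNat := by
    rw [PySem.List.pyGetD_ofNat']
    rfl
  rw [hseed2]
  obtain ⟨len2, get2⟩ := B_loop k n a hlen (n - 2).toNat 2 _ (by norm_num) (by omega) len3
  refine ⟨len2, fun j => ?_⟩
  rw [get2 j, get3 j, getD_set' a 1 j _ h1len]
  by_cases hjn : (j : Int) < n
  · match j with
    | 0 =>
      rw [if_neg (by omega), if_neg (by omega), if_neg (by omega)]
      rfl
    | 1 =>
      rw [if_neg (by omega), if_neg (by omega), if_pos rfl]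
    | (j + 2) =>
      by_cases hpar : ((j : Int)) % 2 = 0
      · rw [if_pos (by push_cast; omega)]
      · rw [if_neg (by push_cast; omega), if_pos (by push_cast; omega)]
  · rw [if_neg (by omega), if_neg (by omega), if_neg (by omega)]
    cases j with
    | zero => exact absurd (by omega) hjn
    | succ j => rw [gseq_succ_ge k n a j (by push_cast at hjn ⊢; omega)]

-- ===== the equivalence =====
theorem A_eq_B (n k : Int) (a : List Int)
    (hpre : Pre_minimum_additional_walks n k a) :
    minimum_additional_walks n k a = minimum_additional_walks_alt n k a := by
  by_cases h2 : 2 ≤ n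
  · have hlen : n ≤ (a.length : Int) := by
      rcases hpre with h | h
      · omega
      · exact h
    cases a with
    | nil => simp at hlen; omega
    | cons x xs =>
      set m : Nat := (n - 1).toNat with hm
      have hn : n = 1 + (m : Int) := by omega
      have hm1 : 1 ≤ m := by omega
      have hmlen : m ≤ xs.length := by
        simp only [List.length_cons] at hlen
        omega
      obtain ⟨blen, bget⟩ := altList_spec n k (x :: xs) h2 hlen
      have hAlen : (x :: chainC k x (xs.take m) ++ xs.drop m).length = (x :: xs).length := by
        simp [length_chainC, List.length_take]
        omega
      have hFeq : altList n k (x :: xs) = x :: chainC k x (xs.take m) ++ xs.drop m := by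
        apply ext_getD _ _ (by rw [blen, hAlen])
        intro j
        rw [bget j, hn, A_getD k x xs m hm1 hmlen j]
      unfold minimum_additional_walks minimum_additional_walks_alt
      rw [hn, A_loop k x m xs hmlen]
      dsimp only
      rw [← hn, hFeq]
      refine Prod.ext ?_ rfl
      have hsum : (xs.take m).sum + (xs.drop m).sum = xs.sum := by
        rw [← List.sum_append, List.take_append_drop]
      simp [List.sum_append]
      omega
  · unfold minimum_additional_walks minimum_additional_walks_alt altList
    rw [PySem.List.pyRange_one_eq_nil (by omega), if_neg h2]
    simp

-- ===== VERDICT (by name: the statement is the Claim_ definition above) =====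
theorem minimum_additional_walks_spec : Claim_equal_minimum_additional_walks := by
  intro n k a _ hpre
  unfold Spec_minimum_additional_walks
  exact A_eq_B n k a hpre
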